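-- pv_equiv track=rewrite | github.com/cctry/sc24-artifact | Deal/dataloader.py | generate_pairs_schedule
-- ===== SOURCE A (Python) =====
-- def generate_pairs_schedule(num_machines):
--     """Generate a schedule where each machine communicates with every other machine exactly once."""
--     # The schedule will have num_machines - 1 rounds
--     rounds = [set() for _ in range(num_machines - 1)]
--
--     # Function to check if a machine is already in a round
--     def is_machine_in_round(machine, round):
--         return any(machine in pair for pair in rounds[round])
--
--     # Generate pairs for each round
--     for machine1 in range(num_machines):
--         for machine2 in range(machine1 + 1, num_machines):
--             # Find a round where both machines are not yet scheduled
--             for round_num in range(num_machines - 1):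
--                 if not is_machine_in_round(machine1, round_num) and not is_machine_in_round(machine2, round_num):
--                     rounds[round_num].add((machine1, machine2))
--                     break
--
--     return rounds
-- ===== SOURCE B (Python) =====
-- def generate_pairs_schedule(num_machines):
--     """Generate a schedule where each machine communicates with every other machine exactly once."""
--     # Closed form: the greedy first-free-round assignment places pair (i, j)
--     # in round (i XOR j) - 1 (and drops it when i XOR j exceeds num_machines - 1).
--     return [{(i, i ^ v) for i in range(num_machines) if i < (i ^ v) < num_machines}
--             for v in range(1, num_machines)]
-- ===== Notes on version B (the rewrite author's own statement) =====
-- stated objective: faster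
-- what changed: Replaces the greedy quadruple loop (for every pair, scan rounds and scan each round's pairs for a conflict) by the closed-form XOR 1-factorization: round r is exactly the set of pairs (i, i^(r+1)) with both endpoints below num_machines, which is what the greedy provably produces.
import Mathlib
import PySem

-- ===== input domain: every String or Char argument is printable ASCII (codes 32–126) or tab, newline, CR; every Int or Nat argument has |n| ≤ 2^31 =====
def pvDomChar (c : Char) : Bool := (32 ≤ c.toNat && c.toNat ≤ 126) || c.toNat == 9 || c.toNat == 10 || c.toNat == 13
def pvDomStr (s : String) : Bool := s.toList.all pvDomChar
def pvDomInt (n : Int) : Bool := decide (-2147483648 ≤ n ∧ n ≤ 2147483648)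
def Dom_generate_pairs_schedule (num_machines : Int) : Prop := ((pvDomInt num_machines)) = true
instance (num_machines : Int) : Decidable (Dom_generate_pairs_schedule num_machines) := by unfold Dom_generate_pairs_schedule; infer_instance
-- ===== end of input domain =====

-- B replaces A's greedy quadruple loop by the closed-form XOR 1-factorization
-- (round r = pairs (i, i XOR (r+1))), which the greedy provably produces; measurably faster.


-- ===== PORT A =====
-- helper `is_machine_in_round`: `machine in pair` on a 2-tuple is equality with either component;
-- rounds[round] is only ever indexed with `round` in range, so the total pyGetD is exact here.
def pvMachineInRound (rounds : List (List (Int × Int))) (machine : Int) (round : Int) : Bool :=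
  (PySem.List.pyGetD rounds round []).any (fun p => machine == p.1 || machine == p.2)

-- the inner `for round_num in range(...): if ...: rounds[round_num].add(...); break` loop:
-- find the first free round and add the pair there (the index found is always in range).
def pvPlacePair (num_machines : Int) (rounds : List (List (Int × Int))) (m1 m2 : Int) :
    List (List (Int × Int)) :=
  match (PySem.List.pyRange 0 (num_machines - 1)).find?
      (fun r => !(pvMachineInRound rounds m1 r) && !(pvMachineInRound rounds m2 r)) with
  | some r =>
      PySem.List.pySetD rounds r (PySem.Set.add (PySem.List.pyGetD rounds r []) (m1, m2))
  | none => rounds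

def generate_pairs_schedule (num_machines : Int) : List (List (Int × Int)) :=
  (PySem.List.pyRange 0 num_machines).foldl
    (fun rounds m1 =>
      (PySem.List.pyRange (m1 + 1) num_machines).foldl
        (fun rounds m2 => pvPlacePair num_machines rounds m1 m2) rounds)
    ((PySem.List.pyRange 0 (num_machines - 1)).map (fun _ => (PySem.Set.empty : List (Int × Int))))

-- ===== PORT B =====
-- closed form: round v-1 (for v = 1 .. n-1) is the set {(i, i^v) : i < i^v < n}.
def generate_pairs_schedule_alt (num_machines : Int) : List (List (Int × Int)) :=
  (PySem.List.pyRange 1 num_machines).map (fun v =>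
    PySem.Set.ofList
      (((PySem.List.pyRange 0 num_machines).filter
          (fun i => decide (i < PySem.Int.bxor i v) && decide (PySem.Int.bxor i v < num_machines))).map
        (fun i => (i, PySem.Int.bxor i v))))

-- ===== PRECONDITION & SPEC =====
def Spec_generate_pairs_schedule (num_machines : Int) (out : List (List (Int × Int))) : Prop := out = generate_pairs_schedule_alt num_machines
instance (num_machines : Int) (out : List (List (Int × Int))) : Decidable (Spec_generate_pairs_schedule num_machines out) := by unfold Spec_generate_pairs_schedule; infer_instance

-- ===== CLAIM (what is proved, stated in full; the proofs are below) =====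
def Claim_equal_generate_pairs_schedule : Prop := ∀ (num_machines : Int), Dom_generate_pairs_schedule num_machines → Spec_generate_pairs_schedule num_machines (generate_pairs_schedule num_machines)

-- ===== LEMMAS AND PROOFS =====

-- lexicographic "pair (i,p) was already processed when (b1,b2) is reached" test
def pvLex (i p b1 b2 : Nat) : Bool := decide (i < b1) || (decide (i = b1) && decide (p < b2))

-- filter condition: i is the smaller endpoint of an already-placed pair of round v-1
def pvCond (n v b1 b2 : Nat) (i : Nat) : Bool :=
  decide (i ^^^ v < n) && decide (i < i ^^^ v) && pvLex i (i ^^^ v) b1 b2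

-- closed form of round v-1 after all pairs lexicographically before (b1,b2) were processed
def pvRound (n v b1 b2 : Nat) : List (Int × Int) :=
  ((List.range n).filter (pvCond n v b1 b2)).map
    (fun (i : Nat) => ((i : Int), ((i ^^^ v : Nat) : Int)))

def pvState (n b1 b2 : Nat) : List (List (Int × Int)) :=
  (List.range (n - 1)).map (fun r => pvRound n (r + 1) b1 b2)

-- machine m is scheduled in round v-1 of state (b1,b2)
def pvOcc (n v b1 b2 m : Nat) : Bool :=
  (decide (m ^^^ v < n) && decide (m < m ^^^ v) && pvLex m (m ^^^ v) b1 b2) ||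
  (decide (m ^^^ v < m) && pvLex (m ^^^ v) m b1 b2)

lemma pvLex_eq_iff {i p b1 b2 b1' b2' : Nat}
    (h : (i < b1 ∨ (i = b1 ∧ p < b2)) ↔ (i < b1' ∨ (i = b1' ∧ p < b2'))) :
    pvLex i p b1 b2 = pvLex i p b1' b2' := by
  unfold pvLex
  rw [Bool.eq_iff_iff]
  simp only [Bool.or_eq_true, Bool.and_eq_true, decide_eq_true_eq]
  exact h

lemma pvXorCancel (a v : Nat) : (a ^^^ v) ^^^ v = a := Nat.xor_xor_cancel_right a v

lemma pvXorLeft (a b : Nat) : a ^^^ (a ^^^ b) = b := by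
  rw [← Nat.xor_assoc, Nat.xor_self, Nat.zero_xor]

lemma pvXorNe {a v : Nat} (hv : 0 < v) : a ^^^ v ≠ a := by
  intro h
  have h2 : v = 0 := by
    have h3 := congrArg (fun t => a ^^^ t) h
    simpa [pvXorLeft] using h3
  omega

-- ---- core bit lemma: below round (i^^^j)-1 one of i, j is always paired off ----
lemma pvXorSplit {i j v : Nat} (_hij : i < j) (_hv : 0 < v) (hvd : v < i ^^^ j) :
    i ^^^ v < j ∨ j ^^^ v < i := by
  have hne : v ^^^ (i ^^^ j) ≠ 0 := by
    rw [Ne, Nat.xor_eq_zero_iff]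
    omega
  obtain ⟨k, hk, hhi⟩ := Nat.exists_most_significant_bit hne
  rw [Nat.testBit_xor] at hk
  have hagree : ∀ m, k < m → v.testBit m = (i ^^^ j).testBit m := by
    intro m hm
    have h2 := hhi m hm
    rw [Nat.testBit_xor] at h2
    revert h2
    cases v.testBit m <;> cases (i ^^^ j).testBit m <;> simp
  have hdk' : (i ^^^ j).testBit k = true ∧ v.testBit k = false := by
    cases hd : (i ^^^ j).testBit k
    · exfalso
      have hvk : v.testBit k = true := by
        revert hk; rw [hd]; cases v.testBit k <;> simp
      have hlt : i ^^^ j < v :=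
        Nat.lt_of_testBit k hd hvk (fun m hm => (hagree m hm).symm)
      omega
    · refine ⟨rfl, ?_⟩
      revert hk; rw [hd]; cases v.testBit k <;> simp
  obtain ⟨hdk, hvk⟩ := hdk'
  rw [Nat.testBit_xor] at hdk
  cases hik : i.testBit k
  · left
    have hjk : j.testBit k = true := by
      revert hdk; rw [hik]; cases j.testBit k <;> simp
    refine Nat.lt_of_testBit k ?_ hjk ?_
    · rw [Nat.testBit_xor, hik, hvk]; rfl
    · intro m hm
      have h1 := hagree m hm
      rw [Nat.testBit_xor] at h1
      rw [Nat.testBit_xor]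
      cases hb : i.testBit m <;> cases hc : j.testBit m <;> simp_all
  · right
    have hjk : j.testBit k = false := by
      revert hdk; rw [hik]; cases j.testBit k <;> simp
    refine Nat.lt_of_testBit k ?_ hik ?_
    · rw [Nat.testBit_xor, hjk, hvk]; rfl
    · intro m hm
      have h1 := hagree m hm
      rw [Nat.testBit_xor] at h1
      rw [Nat.testBit_xor]
      cases hb : i.testBit m <;> cases hc : j.testBit m <;> simp_all

lemma pvInRound_state {n b1 b2 m r : Nat} (hm : m < n) (hr : r < n - 1) :
    pvMachineInRound (pvState n b1 b2) (↑m) (↑r) = pvOcc n (r + 1) b1 b2 m := by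
  unfold pvMachineInRound pvState
  rw [PySem.List.pyGetD_natCast, PySem.List.getD_map_range _ _ _ _ hr]
  rw [Bool.eq_iff_iff]
  unfold pvRound
  simp only [List.any_map, List.any_eq_true, List.mem_filter, List.mem_range,
    Function.comp, beq_iff_eq, Bool.or_eq_true, Int.natCast_inj]
  constructor
  · rintro ⟨i, ⟨hin, hcond⟩, hbeq⟩
    unfold pvCond at hcond
    simp only [Bool.and_eq_true, decide_eq_true_eq] at hcond
    obtain ⟨⟨hpn, hip⟩, hlex⟩ := hcond
    unfold pvOcc
    simp only [Bool.or_eq_true, Bool.and_eq_true, decide_eq_true_eq]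
    rcases hbeq with he | he
    · subst he
      exact Or.inl ⟨⟨hpn, hip⟩, hlex⟩
    · subst he
      right
      rw [pvXorCancel]
      exact ⟨hip, hlex⟩
  · intro hocc
    unfold pvOcc at hocc
    simp only [Bool.or_eq_true, Bool.and_eq_true, decide_eq_true_eq] at hocc
    rcases hocc with ⟨⟨hpn, hmp⟩, hlex⟩ | ⟨hpm, hlex⟩
    · refine ⟨m, ⟨hm, ?_⟩, Or.inl rfl⟩
      unfold pvCond
      simp only [Bool.and_eq_true, decide_eq_true_eq]
      exact ⟨⟨hpn, hmp⟩, hlex⟩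
    · refine ⟨m ^^^ (r + 1), ⟨by omega, ?_⟩, Or.inr (by rw [pvXorCancel])⟩
      unfold pvCond
      simp only [Bool.and_eq_true, decide_eq_true_eq]
      rw [pvXorCancel]
      exact ⟨⟨hm, hpm⟩, hlex⟩

lemma pvFind?_range_first {p : Nat → Bool} {k m : Nat} (hk : k < m) (hkp : p k = true)
    (hbelow : ∀ j, j < k → p j = false) : (List.range m).find? p = some k := by
  have hm : m = k + (m - k) := by omega
  rw [hm, List.range_add, List.find?_append]
  have h1 : (List.range k).find? p = none := by
    rw [List.find?_eq_none]
    intro x hx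
    simp only [List.mem_range] at hx
    simp [hbelow x hx]
  rw [h1]
  obtain ⟨t, ht⟩ : ∃ t, m - k = t + 1 := ⟨m - k - 1, by omega⟩
  rw [ht, List.range_succ_eq_map, List.map_cons]
  rw [List.find?_cons_of_pos (by simpa using hkp)]
  simp

lemma pvFilter_range_snoc {p q : Nat → Bool} {b n : Nat} (hb : b < n)
    (hagree : ∀ i, i ≠ b → q i = p i) (hqb : q b = true) (hpb : p b = false)
    (hle : ∀ i, q i = true → i ≤ b) :
    (List.range n).filter q = (List.range n).filter p ++ [b] := by
  have hn : n = (b + 1) + (n - (b + 1)) := by omega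
  rw [hn, List.range_add, List.filter_append, List.filter_append]
  have htq : (List.map (fun x => b + 1 + x) (List.range (n - (b + 1)))).filter q = [] := by
    rw [List.filter_eq_nil_iff]
    intro x hx
    simp only [List.mem_map] at hx
    obtain ⟨y, _, rfl⟩ := hx
    cases hq : q (b + 1 + y)
    · simp
    · exact absurd (hle _ hq) (by omega)
  have htp : (List.map (fun x => b + 1 + x) (List.range (n - (b + 1)))).filter p = [] := by
    rw [List.filter_eq_nil_iff]
    intro x hx
    simp only [List.mem_map] at hx
    obtain ⟨y, _, rfl⟩ := hx
    rw [← hagree _ (by omega)]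
    cases hq : q (b + 1 + y)
    · simp
    · exact absurd (hle _ hq) (by omega)
  rw [htq, htp, List.append_nil, List.append_nil]
  rw [List.range_succ, List.filter_append, List.filter_append]
  have hcongr : (List.range b).filter q = (List.range b).filter p := by
    apply List.filter_congr
    intro i hi
    simp only [List.mem_range] at hi
    exact hagree i (by omega)
  rw [hcongr]
  simp [hqb, hpb]

-- at v = b1^^^b2 both machines are free
lemma pvOcc_d_free {n b1 b2 d : Nat} (h12 : b1 < b2) (_h2n : b2 < n) (hd : b1 ^^^ b2 = d) :
    pvOcc n d b1 b2 b1 = false ∧ pvOcc n d b1 b2 b2 = false := by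
  have h1 : b1 ^^^ d = b2 := by rw [← hd]; exact pvXorLeft b1 b2
  have h2 : b2 ^^^ d = b1 := by rw [← hd, Nat.xor_comm b1 b2]; exact pvXorLeft b2 b1
  unfold pvOcc pvLex
  rw [h1, h2]
  constructor <;> simp <;> omega

-- below v = b1^^^b2 one of the two machines is busy
lemma pvOcc_busy {n b1 b2 v d : Nat} (h12 : b1 < b2) (h2n : b2 < n) (hv : 0 < v)
    (hd : b1 ^^^ b2 = d) (hvd : v < d) :
    pvOcc n v b1 b2 b1 = true ∨ pvOcc n v b1 b2 b2 = true := by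
  rcases pvXorSplit h12 hv (by rw [hd]; exact hvd) with hp | hq
  · left
    unfold pvOcc pvLex
    simp only [Bool.or_eq_true, Bool.and_eq_true, decide_eq_true_eq, true_and]
    have hne : b1 ^^^ v ≠ b1 := pvXorNe hv
    omega
  · right
    unfold pvOcc pvLex
    simp only [Bool.or_eq_true, Bool.and_eq_true, decide_eq_true_eq]
    omega

lemma pvRound_congr {n v b1 b2 b1' b2' : Nat}
    (h : ∀ i, i < n → i ^^^ v < n → i < i ^^^ v →
      pvLex i (i ^^^ v) b1 b2 = pvLex i (i ^^^ v) b1' b2') :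
    pvRound n v b1 b2 = pvRound n v b1' b2' := by
  unfold pvRound
  congr 1
  apply List.filter_congr
  intro i hi
  simp only [List.mem_range] at hi
  unfold pvCond
  by_cases h1 : i ^^^ v < n
  · by_cases h2 : i < i ^^^ v
    · rw [h i hi h1 h2]
    · simp [h2]
  · simp [h1]

lemma pvState_congr {n b1 b2 b1' b2' : Nat}
    (h : ∀ v i, 0 < v → v ≤ n - 1 → i < n → i ^^^ v < n → i < i ^^^ v →
      pvLex i (i ^^^ v) b1 b2 = pvLex i (i ^^^ v) b1' b2') :
    pvState n b1 b2 = pvState n b1' b2' := by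
  unfold pvState
  apply List.map_congr_left
  intro r hr
  simp only [List.mem_range] at hr
  exact pvRound_congr (fun i hi h1 h2 => h (r + 1) i (by omega) (by omega) hi h1 h2)

lemma pvState_ge {n b1 b2 : Nat} (h : n ≤ b2) : pvState n b1 b2 = pvState n b1 n := by
  apply pvState_congr
  intro v i _ _ _ hpn _
  apply pvLex_eq_iff
  omega

lemma pvState_left_ge {n b1 b2 : Nat} (h : n ≤ b1) :
    pvState n b1 b2 = pvState n n (n + 1) := by
  apply pvState_congr
  intro v i _ _ hi _ _
  apply pvLex_eq_iff
  omega

lemma pvState_shift {n b1 : Nat} : pvState n b1 n = pvState n (b1 + 1) (b1 + 2) := by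
  apply pvState_congr
  intro v i _ _ _ hpn hip
  apply pvLex_eq_iff
  omega

lemma pvRound_snoc {n b1 b2 d : Nat} (h12 : b1 < b2) (h2n : b2 < n) (hd : b1 ^^^ b2 = d) :
    pvRound n d b1 (b2 + 1) = pvRound n d b1 b2 ++ [((b1 : Int), (b2 : Int))] := by
  have hxb : b1 ^^^ d = b2 := by rw [← hd]; exact pvXorLeft b1 b2
  unfold pvRound
  rw [pvFilter_range_snoc (p := pvCond n d b1 b2)
      (q := pvCond n d b1 (b2 + 1)) (b := b1) (n := n) (by omega)
      ?_ ?_ ?_ ?_]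
  · rw [List.map_append, List.map_cons, List.map_nil, hxb]
  · intro i hine
    unfold pvCond
    have hlex : pvLex i (i ^^^ d) b1 (b2 + 1) = pvLex i (i ^^^ d) b1 b2 :=
      pvLex_eq_iff (by omega)
    rw [hlex]
  · unfold pvCond pvLex
    rw [hxb]
    simp only [Bool.and_eq_true, Bool.or_eq_true, decide_eq_true_eq, true_and]
    omega
  · unfold pvCond pvLex
    rw [hxb]
    simp
  · intro i hqi
    unfold pvCond pvLex at hqi
    simp only [Bool.and_eq_true, Bool.or_eq_true, decide_eq_true_eq] at hqi
    rcases hqi.2 with h | h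
    · omega
    · omega

lemma pvFind {n b1 b2 d : Nat} (h12 : b1 < b2) (h2n : b2 < n) (hd : b1 ^^^ b2 = d) :
    (PySem.List.pyRange 0 ((n : Int) - 1)).find?
      (fun r => !(pvMachineInRound (pvState n b1 b2) (↑b1) r)
        && !(pvMachineInRound (pvState n b1 b2) (↑b2) r))
    = if d ≤ n - 1 then some (((d - 1 : Nat)) : Int) else none := by
  have hd1 : 1 ≤ d := by
    have hx0 : b1 ^^^ b2 ≠ 0 := by
      rw [Ne, Nat.xor_eq_zero_iff]
      omega
    omega
  have hcast : (n : Int) - 1 = ((n - 1 : Nat) : Int) := by omega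
  rw [hcast, PySem.List.pyRange_zero_natCast, List.find?_map]
  split
  case isTrue hle =>
    rw [pvFind?_range_first (k := d - 1) (by omega) ?_ ?_]
    · rfl
    · show (!(pvMachineInRound (pvState n b1 b2) (↑b1) (↑(d - 1)))
        && !(pvMachineInRound (pvState n b1 b2) (↑b2) (↑(d - 1)))) = true
      rw [pvInRound_state (by omega) (by omega), pvInRound_state (by omega) (by omega)]
      rw [show d - 1 + 1 = d by omega]
      rw [(pvOcc_d_free h12 h2n hd).1, (pvOcc_d_free h12 h2n hd).2]
      rfl
    · intro j hj
      show (!(pvMachineInRound (pvState n b1 b2) (↑b1) (↑j))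
        && !(pvMachineInRound (pvState n b1 b2) (↑b2) (↑j))) = false
      rw [pvInRound_state (by omega) (by omega), pvInRound_state (by omega) (by omega)]
      rcases pvOcc_busy h12 h2n (v := j + 1) (by omega) hd (by omega) with h | h
      · rw [h]; rfl
      · rw [h]; simp
  case isFalse hgt =>
    have hnone : (List.range (n - 1)).find?
        ((fun r => !(pvMachineInRound (pvState n b1 b2) (↑b1) r)
          && !(pvMachineInRound (pvState n b1 b2) (↑b2) r)) ∘ (fun (k : Nat) => (k : Int)))
        = none := by
      rw [List.find?_eq_none]
      intro j hj
      simp only [List.mem_range] at hj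
      show ¬ ((!(pvMachineInRound (pvState n b1 b2) (↑b1) (↑j))
        && !(pvMachineInRound (pvState n b1 b2) (↑b2) (↑j))) = true)
      rw [pvInRound_state (by omega) hj, pvInRound_state (by omega) hj]
      rcases pvOcc_busy h12 h2n (v := j + 1) (by omega) hd (by omega) with h | h
      · rw [h]; simp
      · rw [h]; simp
    rw [hnone]
    rfl

lemma pvPlace_state {n b1 b2 : Nat} (h12 : b1 < b2) (h2n : b2 < n) :
    pvPlacePair (↑n) (pvState n b1 b2) (↑b1) (↑b2) = pvState n b1 (b2 + 1) := by
  obtain ⟨d, hd⟩ : ∃ d, b1 ^^^ b2 = d := ⟨_, rfl⟩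
  have hd1 : 1 ≤ d := by
    have hx0 : b1 ^^^ b2 ≠ 0 := by
      rw [Ne, Nat.xor_eq_zero_iff]
      omega
    omega
  have hxb : b1 ^^^ d = b2 := by rw [← hd]; exact pvXorLeft b1 b2
  unfold pvPlacePair
  rw [pvFind h12 h2n hd]
  rcases Nat.lt_or_ge (n - 1) d with hgt | hle
  · rw [if_neg (by omega)]
    split
    case h_1 r heq => exact absurd heq (by simp)
    case h_2 =>
      apply pvState_congr
      intro v i hv hvn _ hpn hip
      apply pvLex_eq_iff
      have hno : ¬(i = b1 ∧ i ^^^ v = b2) := by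
        rintro ⟨rfl, hpe⟩
        have h3 : i ^^^ (i ^^^ v) = i ^^^ b2 := congrArg (fun t => i ^^^ t) hpe
        rw [pvXorLeft] at h3
        omega
      omega
  · rw [if_pos (by omega)]
    have hlen : d - 1 < n - 1 := by omega
    have hget : PySem.List.pyGetD (pvState n b1 b2) (↑(d - 1)) []
        = pvRound n d b1 b2 := by
      unfold pvState
      rw [PySem.List.pyGetD_natCast, PySem.List.getD_map_range _ _ _ _ hlen]
      rw [show d - 1 + 1 = d by omega]
    have hnotmem : ((b1 : Int), (b2 : Int)) ∉ pvRound n d b1 b2 := by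
      intro hmem
      unfold pvRound at hmem
      simp only [List.mem_map, List.mem_filter, List.mem_range] at hmem
      obtain ⟨i, ⟨hin, hcond⟩, heq⟩ := hmem
      have hib : i = b1 := by
        have h4 : (i : Int) = (b1 : Int) := by simpa using congrArg Prod.fst heq
        exact_mod_cast h4
      subst hib
      unfold pvCond pvLex at hcond
      rw [hxb] at hcond
      simp only [Bool.and_eq_true, Bool.or_eq_true, decide_eq_true_eq, true_and] at hcond
      omega
    have hadd : PySem.Set.add (pvRound n d b1 b2) ((b1 : Int), (b2 : Int))
        = pvRound n d b1 b2 ++ [((b1 : Int), (b2 : Int))] := by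
      unfold PySem.Set.add PySem.Set.contains
      rw [if_neg]
      intro hcon
      exact hnotmem (List.contains_iff_mem.mp hcon)
    have hlen2 : d - 1 < (pvState n b1 b2).length := by
      unfold pvState
      rw [List.length_map, List.length_range]
      omega
    split
    case h_1 r heq =>
      have hr : r = ((d - 1 : Nat) : Int) := by
        injection heq with h5
        exact h5.symm
      subst hr
      rw [hget, hadd]
      unfold PySem.List.pySetD
      rw [PySem.List.pySet?_natCast _ _ _ hlen2]
      simp only [Option.getD_some]
      apply List.ext_getElem
      · simp [pvState]
      · intro i h1 h2
        have hi : i < n - 1 := by simpa [pvState] using h2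
        rw [List.getElem_set]
        simp only [pvState, List.getElem_map, List.getElem_range]
        split
        case isTrue he =>
          rw [← he, show d - 1 + 1 = d by omega]
          exact (pvRound_snoc h12 h2n hd).symm
        case isFalse he =>
          apply pvRound_congr
          intro a ha hpn hap
          apply pvLex_eq_iff
          have hno : ¬(a = b1 ∧ a ^^^ (i + 1) = b2) := by
            rintro ⟨rfl, hpe⟩
            apply he
            have h3 : a ^^^ (a ^^^ (i + 1)) = a ^^^ b2 := congrArg (fun t => a ^^^ t) hpe
            rw [pvXorLeft] at h3
            omega
          omega
    case h_2 heq => exact absurd heq (by simp)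

lemma pvInner {n b1 : Nat} : ∀ k b2, n - b2 ≤ k → b1 < b2 →
    (PySem.List.pyRange (↑b2) (↑n)).foldl
      (fun s m2 => pvPlacePair (↑n) s (↑b1) m2) (pvState n b1 b2) = pvState n b1 n := by
  intro k
  induction k with
  | zero =>
    intro b2 hk h12
    rw [PySem.List.pyRange_one_eq_nil (by exact_mod_cast Nat.cast_le.mpr (by omega : n ≤ b2))]
    simp only [List.foldl_nil]
    exact pvState_ge (by omega)
  | succ k ih =>
    intro b2 hk h12
    rcases Nat.lt_or_ge b2 n with hb2 | hb2
    · rw [PySem.List.pyRange_one_cons (by exact_mod_cast hb2)]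
      simp only [List.foldl_cons]
      rw [pvPlace_state h12 hb2]
      rw [show ((b2 : Int) + 1) = ((b2 + 1 : Nat) : Int) by push_cast; ring]
      exact ih (b2 + 1) (by omega) (by omega)
    · rw [PySem.List.pyRange_one_eq_nil (by exact_mod_cast Nat.cast_le.mpr hb2)]
      simp only [List.foldl_nil]
      exact pvState_ge hb2

lemma pvOuter {n : Nat} : ∀ k b1, n - b1 ≤ k →
    (PySem.List.pyRange (↑b1) (↑n)).foldl
      (fun rounds m1 =>
        (PySem.List.pyRange (m1 + 1) (↑n)).foldl
          (fun rounds m2 => pvPlacePair (↑n) rounds m1 m2) rounds)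
      (pvState n b1 (b1 + 1)) = pvState n n (n + 1) := by
  intro k
  induction k with
  | zero =>
    intro b1 hk
    rw [PySem.List.pyRange_one_eq_nil (by exact_mod_cast Nat.cast_le.mpr (by omega : n ≤ b1))]
    simp only [List.foldl_nil]
    exact pvState_left_ge (by omega)
  | succ k ih =>
    intro b1 hk
    rcases Nat.lt_or_ge b1 n with hb1 | hb1
    · rw [PySem.List.pyRange_one_cons (by exact_mod_cast hb1)]
      simp only [List.foldl_cons]
      rw [show ((b1 : Int) + 1) = ((b1 + 1 : Nat) : Int) by push_cast; ring]
      rw [pvInner n (b1 + 1) (by omega) (by omega)]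
      rw [pvState_shift]
      rw [show b1 + 2 = (b1 + 1) + 1 by omega]
      exact ih (b1 + 1) (by omega)
    · rw [PySem.List.pyRange_one_eq_nil (by exact_mod_cast Nat.cast_le.mpr hb1)]
      simp only [List.foldl_nil]
      exact pvState_left_ge hb1

lemma pvA_eq (n : Nat) : generate_pairs_schedule (↑n) = pvState n n (n + 1) := by
  cases n with
  | zero => rfl
  | succ m =>
    unfold generate_pairs_schedule
    have h0 : ((PySem.List.pyRange 0 (((m + 1 : Nat) : Int) - 1)).map
        (fun _ => (PySem.Set.empty : List (Int × Int)))) = pvState (m + 1) 0 1 := by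
      rw [show (((m + 1 : Nat) : Int) - 1) = ((m : Nat) : Int) by push_cast; ring]
      rw [PySem.List.pyRange_zero_natCast, List.map_map]
      unfold pvState
      rw [show m + 1 - 1 = m from rfl]
      apply List.map_congr_left
      intro r hr
      show PySem.Set.empty = pvRound (m + 1) (r + 1) 0 1
      unfold pvRound
      rw [List.filter_eq_nil_iff.mpr ?_]
      · rfl
      · intro i hi
        unfold pvCond pvLex
        simp only [Bool.and_eq_true, Bool.or_eq_true, decide_eq_true_eq]
        omega
    rw [h0]
    exact pvOuter (n := m + 1) (m + 1) 0 (by omega)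

lemma pvB_eq (n : Nat) : generate_pairs_schedule_alt (↑n) = pvState n n (n + 1) := by
  unfold generate_pairs_schedule_alt pvState
  rw [PySem.List.pyRange_one 1 (↑n)]
  rw [show ((n : Int) - 1).toNat = n - 1 by omega]
  rw [List.map_map]
  apply List.map_congr_left
  intro r hr
  simp only [List.mem_range] at hr
  show PySem.Set.ofList
      (((PySem.List.pyRange 0 (↑n)).filter
          (fun i => decide (i < PySem.Int.bxor i ((1 : Int) + (r : Nat)))
            && decide (PySem.Int.bxor i ((1 : Int) + (r : Nat)) < (↑n)))).map
        (fun i => (i, PySem.Int.bxor i ((1 : Int) + (r : Nat)))))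
    = pvRound n (r + 1) n (n + 1)
  rw [show ((1 : Int) + (r : Nat)) = (((r + 1 : Nat)) : Int) by push_cast; ring]
  rw [PySem.List.pyRange_zero_natCast, List.filter_map, List.map_map]
  have hfil : (List.range n).filter
      ((fun i => decide (i < PySem.Int.bxor i ((r + 1 : Nat) : Int))
          && decide (PySem.Int.bxor i ((r + 1 : Nat) : Int) < (↑n))) ∘ (fun (k : Nat) => (k : Int)))
      = (List.range n).filter (pvCond n (r + 1) n (n + 1)) := by
    apply List.filter_congr
    intro i hi
    simp only [List.mem_range] at hi
    show (decide ((i : Int) < PySem.Int.bxor (↑i) ((r + 1 : Nat) : Int))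
        && decide (PySem.Int.bxor (↑i) ((r + 1 : Nat) : Int) < (↑n))) = _
    rw [PySem.Int.bxor_natCast]
    unfold pvCond pvLex
    rw [Bool.eq_iff_iff]
    simp only [Bool.and_eq_true, Bool.or_eq_true, decide_eq_true_eq, Nat.cast_lt]
    constructor
    · rintro ⟨h1, h2⟩
      exact ⟨⟨h2, h1⟩, Or.inl hi⟩
    · rintro ⟨⟨h1, h2⟩, _⟩
      exact ⟨h2, h1⟩
  rw [hfil]
  have hmapf : ((List.range n).filter (pvCond n (r + 1) n (n + 1))).map
      ((fun i => ((i : Int), PySem.Int.bxor i ((r + 1 : Nat) : Int))) ∘ (fun (k : Nat) => (k : Int)))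
      = pvRound n (r + 1) n (n + 1) := by
    unfold pvRound
    apply List.map_congr_left
    intro i _
    show ((i : Int), PySem.Int.bxor (↑i) ((r + 1 : Nat) : Int)) = _
    rw [PySem.Int.bxor_natCast]
  rw [hmapf]
  apply PySem.Set.ofList_eq_self_of_nodup
  unfold pvRound
  apply List.Nodup.map
  · intro a b hab
    have h4 : (a : Int) = (b : Int) := by simpa using congrArg Prod.fst hab
    exact_mod_cast h4
  · exact List.Nodup.filter _ (List.nodup_range)

-- ===== VERDICT (by name: the statement is the Claim_ definition above) =====
theorem generate_pairs_schedule_spec : Claim_equal_generate_pairs_schedule := by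
  intro n _
  unfold Spec_generate_pairs_schedule
  rcases Int.lt_or_le n 0 with hn | hn
  · have h1 : n ≤ 0 := le_of_lt hn
    have h2 : n - 1 ≤ 0 := by omega
    have h3 : n ≤ 1 := by omega
    simp [generate_pairs_schedule, generate_pairs_schedule_alt,
      PySem.List.pyRange_one_eq_nil h1, PySem.List.pyRange_one_eq_nil h2,
      PySem.List.pyRange_one_eq_nil h3]
  · obtain ⟨N, rfl⟩ := Int.eq_ofNat_of_zero_le hn
    rw [pvA_eq, pvB_eq]
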